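-- pv_equiv track=rewrite | github.com/FairSoft-git/ampys | battleships/battleship_functions.py | validate_ship_positions
-- ===== SOURCE A (Python) =====
-- MAX_GRID_SIZE = 10
--
-- def validate_ship_positions(fleet_grid, ship_chars, ship_sizes):
--
--     ''' (list of list of str, list of str, list of int) -> bool
--
--     Return True if and only if every ship in ship_chars is located in one row
--     or one column with the right ship_sizes in the fleet_grid.
--
--     Precondition: the fleet_grid, ship_sizes, ship_chars are valid.
--
--     >>> grid = [['a', 'b', 'b'], ['a', 'c', '.'], ['a', 'c', '.']]
--     >>> validate_ship_positions(grid, ['a', 'b', 'c'], [3, 2, 2])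
--     True
--     >>> grid = [['a', '.', 'b'], ['.', 'b', '.'], ['a', '.', '.']]
--     >>> validate_ship_positions(grid, ['a', 'b'], [2, 2])
--     False
--     '''
--     # Validate grid size
--     if len(fleet_grid) > MAX_GRID_SIZE:
--             return False
--     location = 0
--     for size in ship_sizes:
--         if size != 1:
--             rows = get_location(fleet_grid, ship_chars[location])[0]
--             columns = get_location(fleet_grid, ship_chars[location])[1]
--             # Check the whole ship is in one row or one column
--             if (rows.count(rows[0]) != len(rows) and \
--                columns.count(columns[0]) != len(columns)) or len(rows) != size:
--                 return False
--             elif rows.count(rows[0]) == len(rows):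
--                 if columns[-1] - columns[0] != size - 1:
--                     return False
--             elif columns.count(columns[0]) == len(columns):
--                 if rows[-1] - rows[0] != size - 1:
--                     return False
--         location += 1
--     return True
--
-- def get_location(fleet_grid, ship_char):
--     ''' (list of list of str, str) -> list of list of int
--
--     Return a list containing all the row index for the ship_char from in the
--     fleet_grid as a list of intigers at index 0, and all the column index for
--     the ship_char as a list of ints at index 1.
--
--     >>> grid = [['.', 'a', '.'], ['.', 'a', 'b'], ['.', 'a', 'b']]
--     >>> get_location(grid, 'a')
--     [[0, 1, 2], [1, 1, 1]]
--     >>> grid = [['a', 'b', 'b'], ['a', '.', '.'], ['c', 'c', 'c']]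
--     >>> get_location(grid, 'b')
--     [[0, 0], [1, 2]]
--     '''
--     row_list = []
--     column_list = []
--     for i in range(len(fleet_grid)):
--         if ship_char in fleet_grid[i]:
--             char_location = 0
--             for char in fleet_grid[i]:
--                 if char == ship_char:
--                     row_list.append(i)
--                     column_list.append(char_location)
--                 char_location += 1
--     return [row_list, column_list]
-- ===== SOURCE B (Python) =====
-- MAX_GRID_SIZE = 10
--
-- def validate_ship_positions(fleet_grid, ship_chars, ship_sizes):
--     '''Single pass over the grid builds a char -> list of (row, col) index,
--     then each ship is checked in O(size) against its own cells.'''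
--     if len(fleet_grid) > MAX_GRID_SIZE:
--         return False
--     positions = {}
--     for r, row in enumerate(fleet_grid):
--         for c, ch in enumerate(row):
--             positions[ch] = positions.get(ch, []) + [(r, c)]
--     for ch, size in zip(ship_chars, ship_sizes):
--         if size == 1:
--             continue
--         cells = positions[ch]
--         r0, c0 = cells[0]
--         same_row = all(r == r0 for r, _ in cells)
--         same_col = all(c == c0 for _, c in cells)
--         if (not same_row and not same_col) or len(cells) != size:
--             return False
--         if same_row:
--             if cells[-1][1] - c0 != size - 1:
--                 return False
--         elif cells[-1][0] - r0 != size - 1: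
--             return False
--     return True
-- ===== Notes on version B (the rewrite author's own statement) =====
-- stated objective: faster
-- what changed: Instead of rescanning the whole grid per ship (get_location called twice per ship), B makes a single pass over the grid building a char -> list-of-(row,col) index and then checks each ship against its own cell list.
import Mathlib
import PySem

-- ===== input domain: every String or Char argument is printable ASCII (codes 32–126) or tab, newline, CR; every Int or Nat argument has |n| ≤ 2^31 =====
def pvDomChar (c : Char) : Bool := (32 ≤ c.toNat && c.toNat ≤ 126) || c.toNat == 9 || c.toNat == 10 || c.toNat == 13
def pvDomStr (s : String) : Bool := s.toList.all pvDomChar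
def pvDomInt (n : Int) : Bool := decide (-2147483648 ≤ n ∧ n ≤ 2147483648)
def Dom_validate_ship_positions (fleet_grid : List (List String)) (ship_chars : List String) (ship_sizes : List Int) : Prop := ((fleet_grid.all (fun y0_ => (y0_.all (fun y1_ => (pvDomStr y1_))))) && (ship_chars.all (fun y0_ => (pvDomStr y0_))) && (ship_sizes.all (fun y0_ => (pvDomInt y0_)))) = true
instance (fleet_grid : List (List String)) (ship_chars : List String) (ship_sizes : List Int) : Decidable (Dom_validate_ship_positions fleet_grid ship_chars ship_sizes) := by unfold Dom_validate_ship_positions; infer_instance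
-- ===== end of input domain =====

-- B replaces A's per-ship full-grid scans (get_location called per ship) by one pass over the
-- grid building a char -> cell-list index, then an O(size) check per ship.  Return values agree
-- on Pre_; equivalence is about the return value only (neither program mutates its arguments).

-- ===== PORT A =====
-- helper get_location: returns [row_list, column_list]
def get_location (fleet_grid : List (List String)) (ship_char : String) : List (List Int) :=
  let p := (PySem.List.enumerate fleet_grid 0).foldl
    (fun (acc : List Int × List Int) (pr : Int × List String) =>
      if ship_char ∈ pr.2 then
        let st := pr.2.foldl
          (fun (st : List Int × List Int × Int) (ch : String) =>
            if ch == ship_char then (st.1 ++ [pr.1], st.2.1 ++ [st.2.2], st.2.2 + 1)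
            else (st.1, st.2.1, st.2.2 + 1))
          (acc.1, acc.2, (0 : Int))
        (st.1, st.2.1)
      else acc)
    ([], [])
  [p.1, p.2]

-- the 'for size in ship_sizes' loop with the running 'location' counter and early returns
def vspLoopA (fleet_grid : List (List String)) (ship_chars : List String)
    (location : Int) : List Int → Bool
  | [] => true
  | size :: rest =>
    if size ≠ 1 then
      let ch := (PySem.List.pyGet? ship_chars location).getD ""   -- IndexError (= none) excluded by Pre_
      let rows := (get_location fleet_grid ch).getD 0 []
      let columns := (get_location fleet_grid ch).getD 1 []
      -- rows[0] / columns[0] / [-1] on an empty list raise in Python; excluded by Pre_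
      if (rows.count (PySem.List.pyGetD rows 0 0) ≠ rows.length ∧
          columns.count (PySem.List.pyGetD columns 0 0) ≠ columns.length) ∨ (rows.length : Int) ≠ size then
        false
      else if rows.count (PySem.List.pyGetD rows 0 0) = rows.length then
        if PySem.List.pyGetD columns (-1) 0 - PySem.List.pyGetD columns 0 0 ≠ size - 1 then false
        else vspLoopA fleet_grid ship_chars (location + 1) rest
      else if columns.count (PySem.List.pyGetD columns 0 0) = columns.length then
        if PySem.List.pyGetD rows (-1) 0 - PySem.List.pyGetD rows 0 0 ≠ size - 1 then false
        else vspLoopA fleet_grid ship_chars (location + 1) rest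
      else vspLoopA fleet_grid ship_chars (location + 1) rest
    else vspLoopA fleet_grid ship_chars (location + 1) rest

def validate_ship_positions (fleet_grid : List (List String)) (ship_chars : List String) (ship_sizes : List Int) : Bool :=
  if fleet_grid.length > 10 then false
  else vspLoopA fleet_grid ship_chars 0 ship_sizes

-- ===== PORT B =====
-- one pass over the grid: positions[ch] = positions.get(ch, []) + [(r, c)]
def buildPositions (fleet_grid : List (List String)) : PySem.Dict String (List (Int × Int)) :=
  (PySem.List.enumerate fleet_grid 0).foldl
    (fun d pr =>
      (PySem.List.enumerate pr.2 0).foldl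
        (fun d2 qc => d2.insert qc.2 (d2.getD qc.2 [] ++ [(pr.1, qc.1)])) d)
    PySem.Dict.empty

-- the 'for ch, size in zip(ship_chars, ship_sizes)' loop with early returns
def vspLoopB (positions : PySem.Dict String (List (Int × Int))) : List (String × Int) → Bool
  | [] => true
  | (ch, size) :: rest =>
    if size == 1 then vspLoopB positions rest
    else
      let cells := positions.getD ch []      -- KeyError excluded by Pre_
      let r0 := (cells.getD 0 ((0 : Int), (0 : Int))).1    -- cells[0] on empty raises; excluded by Pre_
      let c0 := (cells.getD 0 ((0 : Int), (0 : Int))).2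
      let same_row := cells.all (fun p => p.1 == r0)
      let same_col := cells.all (fun p => p.2 == c0)
      if (¬ same_row = true ∧ ¬ same_col = true) ∨ (cells.length : Int) ≠ size then false
      else if same_row then
        if (PySem.List.pyGetD cells (-1) ((0 : Int), (0 : Int))).2 - c0 ≠ size - 1 then false
        else vspLoopB positions rest
      else
        if (PySem.List.pyGetD cells (-1) ((0 : Int), (0 : Int))).1 - r0 ≠ size - 1 then false
        else vspLoopB positions rest

def validate_ship_positions_alt (fleet_grid : List (List String)) (ship_chars : List String) (ship_sizes : List Int) : Bool :=
  if fleet_grid.length > 10 then false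
  else vspLoopB (buildPositions fleet_grid) (ship_chars.zip ship_sizes)

-- ===== PRECONDITION & SPEC =====
-- canonical row-major cell list of a character in the grid (declarative; used by Pre_ and the proofs)
def cellsRow (ch : String) (i k : Int) : List String → List (Int × Int)
  | [] => []
  | x :: xs => if x == ch then (i, k) :: cellsRow ch i (k + 1) xs else cellsRow ch i (k + 1) xs

def cellsGrid (ch : String) (i : Int) : List (List String) → List (Int × Int)
  | [] => []
  | row :: rest => cellsRow ch i 0 row ++ cellsGrid ch (i + 1) rest

-- 'ship (ch, size) passes A's per-ship check without raising': its cells are nonempty, there are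
-- exactly `size` of them, and they lie in one row with the right column span, or else in one
-- column with the right row span (the elif order of A's check)
def shipPassB (fleet_grid : List (List String)) (ch : String) (size : Int) : Bool :=
  let cs := cellsGrid ch 0 fleet_grid
  !cs.isEmpty && ((cs.length : Int) == size) &&
  (if cs.all (fun p => p.1 == (cs.getD 0 ((0 : Int), (0 : Int))).1) then
     (PySem.List.pyGetD cs (-1) ((0 : Int), (0 : Int))).2 - (cs.getD 0 ((0 : Int), (0 : Int))).2 == size - 1
   else
     cs.all (fun p => p.2 == (cs.getD 0 ((0 : Int), (0 : Int))).2) &&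
     ((PySem.List.pyGetD cs (-1) ((0 : Int), (0 : Int))).1 - (cs.getD 0 ((0 : Int), (0 : Int))).1 == size - 1))

-- Pre_ excludes exactly the inputs on which the Python A raises (IndexError): a ship with
-- size ≠ 1 that A's loop actually REACHES (i.e. every earlier size ≠ 1 ship passed its check,
-- expressed by shipPassP) whose index is past the end of ship_chars, or whose char does not
-- occur in the grid (rows[0] on the empty list).  Wherever A returns a value, Pre_ holds.
def Pre_validate_ship_positions (fleet_grid : List (List String)) (ship_chars : List String) (ship_sizes : List Int) : Prop :=
  10 < fleet_grid.length ∨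
  ∀ i : Nat, i < ship_sizes.length → ship_sizes.getD i 1 ≠ 1 →
    (∀ j : Nat, j < i → ship_sizes.getD j 1 ≠ 1 →
        j < ship_chars.length ∧ shipPassB fleet_grid (ship_chars.getD j "") (ship_sizes.getD j 1) = true) →
    i < ship_chars.length ∧ cellsGrid (ship_chars.getD i "") 0 fleet_grid ≠ []
instance (fleet_grid : List (List String)) (ship_chars : List String) (ship_sizes : List Int) : Decidable (Pre_validate_ship_positions fleet_grid ship_chars ship_sizes) := by unfold Pre_validate_ship_positions; infer_instance

def pvWitness_validate_ship_positions : List (List String) × List String × List Int :=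
  ([["a", "b", "b"], ["a", "c", "."], ["a", "c", "."]], ["a", "b", "c"], [3, 2, 2])

def Spec_validate_ship_positions (fleet_grid : List (List String)) (ship_chars : List String) (ship_sizes : List Int) (out : Bool) : Prop := out = validate_ship_positions_alt fleet_grid ship_chars ship_sizes
instance (fleet_grid : List (List String)) (ship_chars : List String) (ship_sizes : List Int) (out : Bool) : Decidable (Spec_validate_ship_positions fleet_grid ship_chars ship_sizes out) := by unfold Spec_validate_ship_positions; infer_instance

-- ===== CLAIM (what is proved, stated in full; the proofs are below) =====
def Claim_equal_validate_ship_positions : Prop := ∀ (fleet_grid : List (List String)) (ship_chars : List String) (ship_sizes : List Int), Dom_validate_ship_positions fleet_grid ship_chars ship_sizes → Pre_validate_ship_positions fleet_grid ship_chars ship_sizes → Spec_validate_ship_positions fleet_grid ship_chars ship_sizes (validate_ship_positions fleet_grid ship_chars ship_sizes)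

-- ===== LEMMAS AND PROOFS =====

theorem cellsRow_eq_nil_of_not_mem {ch : String} {row : List String} (h : ch ∉ row) (i : Int) :
    ∀ k : Int, cellsRow ch i k row = [] := by
  induction row with
  | nil => intro k; rfl
  | cons x xs ih =>
    intro k
    have hx : ¬ x = ch := fun hh => h (by simp [hh])
    have hxs : ch ∉ xs := fun hh => h (by simp [hh])
    simp [cellsRow, hx, ih hxs]

-- A's inner loop over one row
theorem innerA_eq (ch : String) (i : Int) (row : List String) :
    ∀ (rl cl : List Int) (k : Int),
      row.foldl
        (fun (st : List Int × List Int × Int) (c : String) =>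
          if c == ch then (st.1 ++ [i], st.2.1 ++ [st.2.2], st.2.2 + 1)
          else (st.1, st.2.1, st.2.2 + 1)) (rl, cl, k)
      = (rl ++ (cellsRow ch i k row).map Prod.fst,
         cl ++ (cellsRow ch i k row).map Prod.snd,
         k + row.length) := by
  induction row with
  | nil => intro rl cl k; simp [cellsRow]
  | cons x xs ih =>
    intro rl cl k
    by_cases hx : (x == ch) = true
    · simp only [List.foldl_cons, hx, if_pos]
      rw [ih]
      simp [cellsRow, hx]
      omega
    · simp only [List.foldl_cons, hx, if_neg, Bool.false_eq_true, not_false_eq_true]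
      rw [ih]
      simp [cellsRow, hx]
      omega

-- A's outer loop
theorem get_location_eq (fleet_grid : List (List String)) (ch : String) :
    get_location fleet_grid ch =
      [(cellsGrid ch 0 fleet_grid).map Prod.fst, (cellsGrid ch 0 fleet_grid).map Prod.snd] := by
  have main : ∀ (g : List (List String)) (i : Int) (rl cl : List Int),
      (PySem.List.enumerate g i).foldl
        (fun (acc : List Int × List Int) (pr : Int × List String) =>
          if ch ∈ pr.2 then
            let st := pr.2.foldl
              (fun (st : List Int × List Int × Int) (c : String) =>
                if c == ch then (st.1 ++ [pr.1], st.2.1 ++ [st.2.2], st.2.2 + 1)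
                else (st.1, st.2.1, st.2.2 + 1))
              (acc.1, acc.2, (0 : Int))
            (st.1, st.2.1)
          else acc) (rl, cl)
      = (rl ++ (cellsGrid ch i g).map Prod.fst, cl ++ (cellsGrid ch i g).map Prod.snd) := by
    intro g
    induction g with
    | nil => intro i rl cl; simp [PySem.List.enumerate_nil, cellsGrid]
    | cons row rest ih =>
      intro i rl cl
      rw [PySem.List.enumerate_cons]
      simp only [List.foldl_cons]
      by_cases hm : ch ∈ row
      · simp only [hm, if_pos]
        rw [innerA_eq ch i row rl cl 0]
        rw [ih]
        simp [cellsGrid]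
      · simp only [hm, if_neg, not_false_eq_true]
        rw [ih]
        simp [cellsGrid, cellsRow_eq_nil_of_not_mem hm]
  unfold get_location
  rw [main fleet_grid 0 [] []]
  simp

-- B's dict build
theorem buildPositions_getD (fleet_grid : List (List String)) (ch : String) :
    (buildPositions fleet_grid).getD ch [] = cellsGrid ch 0 fleet_grid := by
  have inner : ∀ (row : List String) (i k : Int) (d : PySem.Dict String (List (Int × Int))),
      ((PySem.List.enumerate row k).foldl
        (fun d2 (qc : Int × String) => d2.insert qc.2 (d2.getD qc.2 [] ++ [(i, qc.1)])) d).getD ch []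
      = d.getD ch [] ++ cellsRow ch i k row := by
    intro row
    induction row with
    | nil => intro i k d; simp [PySem.List.enumerate_nil, cellsRow]
    | cons x xs ih =>
      intro i k d
      rw [PySem.List.enumerate_cons]
      simp only [List.foldl_cons]
      rw [ih]
      by_cases hx : x = ch
      · subst hx; simp [cellsRow]
      · have hx' : ¬ ch = x := fun hh => hx hh.symm
        rw [PySem.Dict.getD_insert]
        simp [cellsRow, hx, hx']
  have outer : ∀ (g : List (List String)) (i : Int) (d : PySem.Dict String (List (Int × Int))),
      ((PySem.List.enumerate g i).foldl
        (fun d (pr : Int × List String) =>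
          (PySem.List.enumerate pr.2 0).foldl
            (fun d2 (qc : Int × String) => d2.insert qc.2 (d2.getD qc.2 [] ++ [(pr.1, qc.1)])) d) d).getD ch []
      = d.getD ch [] ++ cellsGrid ch i g := by
    intro g
    induction g with
    | nil => intro i d; simp [PySem.List.enumerate_nil, cellsGrid]
    | cons row rest ih =>
      intro i d
      rw [PySem.List.enumerate_cons]
      simp only [List.foldl_cons]
      rw [ih, inner]
      simp [cellsGrid]
  unfold buildPositions
  rw [outer]
  simp [PySem.Dict.empty, PySem.Dict.getD, PySem.Dict.get?]

-- all-equal-to-head vs count-equals-length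
theorem count_eq_length_iff_all (l : List Int) (a : Int) :
    (l.count a = l.length) ↔ (l.all (fun x => x == a) = true) := by
  rw [List.count_eq_length]
  simp only [List.all_eq_true, beq_iff_eq]
  exact ⟨fun h x hx => (h x hx).symm, fun h x hx => (h x hx).symm⟩

-- first/last projections through map
theorem getD_zero_map_fst (cells : List (Int × Int)) (h : cells ≠ []) :
    (cells.map Prod.fst).getD 0 0 = (cells.getD 0 (0, 0)).1 := by
  cases cells with
  | nil => exact absurd rfl h
  | cons p t => simp

theorem getD_zero_map_snd (cells : List (Int × Int)) (h : cells ≠ []) :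
    (cells.map Prod.snd).getD 0 0 = (cells.getD 0 (0, 0)).2 := by
  cases cells with
  | nil => exact absurd rfl h
  | cons p t => simp

theorem pyGetD_neg_one_map_fst (cells : List (Int × Int)) (h : cells ≠ []) :
    PySem.List.pyGetD (cells.map Prod.fst) (-1) 0 = (PySem.List.pyGetD cells (-1) (0, 0)).1 := by
  rw [PySem.List.pyGetD_neg_ofNat (cells.map Prod.fst) 1 0 (by omega)
        (by simpa using List.length_pos_of_ne_nil h),
      PySem.List.pyGetD_neg_ofNat cells 1 (0, 0) (by omega)
        (List.length_pos_of_ne_nil h)]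
  simp

theorem pyGetD_neg_one_map_snd (cells : List (Int × Int)) (h : cells ≠ []) :
    PySem.List.pyGetD (cells.map Prod.snd) (-1) 0 = (PySem.List.pyGetD cells (-1) (0, 0)).2 := by
  rw [PySem.List.pyGetD_neg_ofNat (cells.map Prod.snd) 1 0 (by omega)
        (by simpa using List.length_pos_of_ne_nil h),
      PySem.List.pyGetD_neg_ofNat cells 1 (0, 0) (by omega)
        (List.length_pos_of_ne_nil h)]
  simp

-- the invariant the 'for size in ship_sizes' induction carries: every size ≠ 1 ship of the
-- remaining suffix that is reached (all its predecessors in the suffix pass) is in range and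
-- present in the grid
def suffixSafe (fleet_grid : List (List String)) (ship_chars : List String)
    (loc : Nat) (sizes : List Int) : Prop :=
  ∀ i : Nat, i < sizes.length → sizes.getD i 1 ≠ 1 →
    (∀ j : Nat, j < i → sizes.getD j 1 ≠ 1 →
        loc + j < ship_chars.length ∧
        shipPassB fleet_grid (ship_chars.getD (loc + j) "") (sizes.getD j 1) = true) →
    loc + i < ship_chars.length ∧ cellsGrid (ship_chars.getD (loc + i) "") 0 fleet_grid ≠ []

-- loop equivalence
theorem loop_eq (fleet_grid : List (List String)) (ship_chars : List String) :
    ∀ (sizes : List Int) (loc : Nat),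
      suffixSafe fleet_grid ship_chars loc sizes →
      vspLoopA fleet_grid ship_chars (loc : Int) sizes =
        vspLoopB (buildPositions fleet_grid) ((ship_chars.drop loc).zip sizes) := by
  intro sizes
  induction sizes with
  | nil => intro loc _; simp [vspLoopA, vspLoopB]
  | cons size rest ih =>
    intro loc H
    have hcast : ((loc : Int) + 1) = ((loc + 1 : Nat) : Int) := by push_cast; ring
    by_cases hs : size = 1
    · -- size == 1: both sides just move on
      subst hs
      have Hshift : suffixSafe fleet_grid ship_chars (loc + 1) rest := by
        intro i hi hne hpre
        have h := H (i + 1) (by simpa using Nat.succ_lt_succ hi) (by simpa using hne)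
          (by
            intro j hj hjne
            cases j with
            | zero => simp at hjne
            | succ j' =>
              have := hpre j' (by omega) (by simpa using hjne)
              constructor
              · omega
              · have e1 : loc + (j' + 1) = loc + 1 + j' := by omega
                rw [e1]
                simpa using this.2)
        constructor
        · omega
        · have e2 : loc + (i + 1) = loc + 1 + i := by omega
          rw [← e2]; exact h.2
      have hA : vspLoopA fleet_grid ship_chars (loc : Int) ((1 : Int) :: rest) =
          vspLoopA fleet_grid ship_chars ((loc : Int) + 1) rest := by
        simp [vspLoopA]
      rw [hA, hcast, ih (loc + 1) Hshift]
      rcases e : ship_chars.drop loc with _ | ⟨ch, tail⟩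
      · have : ship_chars.drop (loc + 1) = [] := by
          have hlen : ship_chars.length ≤ loc := List.drop_eq_nil_iff.mp e
          exact List.drop_eq_nil_iff.mpr (by omega)
        simp [this, vspLoopB]
      · have hdrop : ship_chars.drop (loc + 1) = tail := by
          have ht : (ship_chars.drop loc).tail = ship_chars.drop (loc + 1) := List.tail_drop ..
          rw [← ht, e]; rfl
        rw [hdrop]
        simp [vspLoopB]
    · -- size ≠ 1: this ship is reached with an empty predecessor set
      have h0 := H 0 (by simp) (by simpa using hs) (by intro j hj; omega)
      have hloc : loc < ship_chars.length := by simpa using h0.1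
      have e : ship_chars.drop loc = ship_chars[loc] :: ship_chars.drop (loc + 1) :=
        List.drop_eq_getElem_cons hloc
      set ch := ship_chars[loc] with hchdef
      have hgetD : ship_chars.getD loc "" = ch := by
        simp [List.getD, List.getElem?_eq_getElem hloc]
        exact hchdef.symm
      have hcn : cellsGrid ch 0 fleet_grid ≠ [] := by
        have := h0.2; rw [show loc + 0 = loc by omega, hgetD] at this; exact this
      have hget : (PySem.List.pyGet? ship_chars (loc : Int)).getD "" = ch := by
        rw [PySem.List.pyGet?_natCast, List.getElem?_eq_getElem hloc]; rfl
      have hcells : (buildPositions fleet_grid).getD ch [] = cellsGrid ch 0 fleet_grid :=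
        buildPositions_getD fleet_grid ch
      -- the induction step, available once this ship passes
      have hih : shipPassB fleet_grid ch size = true →
          vspLoopA fleet_grid ship_chars ((loc : Int) + 1) rest =
            vspLoopB (buildPositions fleet_grid) ((ship_chars.drop (loc + 1)).zip rest) := by
        intro hp
        rw [hcast]
        apply ih (loc + 1)
        intro i hi hne hpre
        have h := H (i + 1) (by simpa using Nat.succ_lt_succ hi) (by simpa using hne)
          (by
            intro j hj hjne
            cases j with
            | zero =>
              refine ⟨by omega, ?_⟩
              rw [show loc + 0 = loc by omega, hgetD]
              simpa using hp
            | succ j' =>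
              have := hpre j' (by omega) (by simpa using hjne)
              refine ⟨by omega, ?_⟩
              have e1 : loc + (j' + 1) = loc + 1 + j' := by omega
              rw [e1]
              simpa using this.2)
        refine ⟨by omega, ?_⟩
        have e2 : loc + (i + 1) = loc + 1 + i := by omega
        rw [← e2]; exact h.2
      rw [e]
      simp only [vspLoopA, vspLoopB, List.zip_cons_cons, hget,
        get_location_eq fleet_grid ch, hcells]
      set cells := cellsGrid ch 0 fleet_grid with hc
      set r0 := (cells.getD 0 ((0 : Int), (0 : Int))).1 with hr0
      set c0 := (cells.getD 0 ((0 : Int), (0 : Int))).2 with hc0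
      have hgd0 : ([(cells.map Prod.fst), (cells.map Prod.snd)] : List (List Int)).getD 0 [] = cells.map Prod.fst := rfl
      have hgd1 : ([(cells.map Prod.fst), (cells.map Prod.snd)] : List (List Int)).getD 1 [] = cells.map Prod.snd := rfl
      rw [hgd0, hgd1]
      have hf0 : PySem.List.pyGetD (cells.map Prod.fst) 0 0 = r0 := by
        rw [PySem.List.pyGetD_zero, getD_zero_map_fst cells hcn]
      have hs0 : PySem.List.pyGetD (cells.map Prod.snd) 0 0 = c0 := by
        rw [PySem.List.pyGetD_zero, getD_zero_map_snd cells hcn]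
      rw [hf0, hs0, pyGetD_neg_one_map_fst cells hcn, pyGetD_neg_one_map_snd cells hcn]
      have hcr : ((cells.map Prod.fst).count r0 = (cells.map Prod.fst).length) ↔
          (cells.all (fun p => p.1 == r0) = true) := by
        rw [count_eq_length_iff_all]
        simp [List.all_map, Function.comp_def]
      have hcc : ((cells.map Prod.snd).count c0 = (cells.map Prod.snd).length) ↔
          (cells.all (fun p => p.2 == c0) = true) := by
        rw [count_eq_length_iff_all]
        simp [List.all_map, Function.comp_def]
      have hlm : ((cells.map Prod.fst).length : Int) = (cells.length : Int) := by simp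
      simp only [hcr, hcc, hlm, ne_eq, hs, not_false_eq_true, if_true]
      by_cases hrow : cells.all (fun p => p.1 == r0) = true
      · by_cases hlen : (cells.length : Int) = size
        · by_cases hcb : (PySem.List.pyGetD cells (-1) ((0 : Int), (0 : Int))).2 - c0 = size - 1
          · have hp : shipPassB fleet_grid ch size = true := by
              simp only [shipPassB, ← hc, ← hr0, ← hc0]
              simp [hcn, hlen, hrow, hcb]
            simp [hrow, hlen, hcb, hih hp]
          · simp [hrow, hlen, hcb, hs]
        · simp [hrow, hlen, hs]
      · by_cases hcol : cells.all (fun p => p.2 == c0) = true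
        · by_cases hlen : (cells.length : Int) = size
          · by_cases hrb : (PySem.List.pyGetD cells (-1) ((0 : Int), (0 : Int))).1 - r0 = size - 1
            · have hp : shipPassB fleet_grid ch size = true := by
                simp only [shipPassB, ← hc, ← hr0, ← hc0]
                simp [hcn, hlen, hrow, hcol, hrb]
              simp [hrow, hcol, hlen, hrb, hih hp]
            · simp [hrow, hcol, hlen, hrb, hs]
          · simp [hrow, hcol, hlen, hs]
        · simp [hrow, hcol, hs]

-- ===== VERDICT (by name: the statement is the Claim_ definition above) =====
theorem validate_ship_positions_spec : Claim_equal_validate_ship_positions := by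
  intro fleet_grid ship_chars ship_sizes _hdom hpre
  unfold Spec_validate_ship_positions validate_ship_positions validate_ship_positions_alt
  by_cases hg : fleet_grid.length > 10
  · simp [hg]
  · simp only [hg, if_neg, not_false_eq_true]
    rcases hpre with h10 | hall
    · omega
    · have hsafe : suffixSafe fleet_grid ship_chars 0 ship_sizes := by
        intro i hi hne hpre'
        have := hall i hi hne (by
          intro j hj hjne
          have h := hpre' j hj hjne
          simpa using h)
        simpa using this
      have := loop_eq fleet_grid ship_chars ship_sizes 0 hsafe
      simpa using this
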